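-- pv_equiv track=rewrite | github.com/jano31415/codejam | codeforces/823_round_div2/proba.py | solve
-- ===== SOURCE A (Python) =====
-- def solve(n,c,orbits):
--     orb_dict = {}
--     for x in orbits:
--         if x not in orb_dict:
--             orb_dict[x] = 0
--         orb_dict[x] += 1
--     tot=0
--     for orb in orb_dict:
--         orb_val = orb_dict[orb]
--         if orb_val >= c:
--             tot+=c
--         else:
--             tot+=orb_val
--     return tot
-- ===== SOURCE B (Python) =====
-- def solve(n, c, orbits):
--     # sort, then add min(run length, c) for each maximal run of equal values
--     s = sorted(orbits)
--     tot = 0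
--     i = 0
--     while i < len(s):
--         j = i + 1
--         while j < len(s) and s[j] == s[i]:
--             j += 1
--         tot += min(j - i, c)
--         i = j
--     return tot
-- ===== Notes on version B (the rewrite author's own statement) =====
-- stated objective: alternative
-- what changed: B sorts the list and sums min(run length, c) over maximal runs of equal values in one scan, instead of building a dict histogram and then summing the capped counts over its keys.
import Mathlib
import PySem

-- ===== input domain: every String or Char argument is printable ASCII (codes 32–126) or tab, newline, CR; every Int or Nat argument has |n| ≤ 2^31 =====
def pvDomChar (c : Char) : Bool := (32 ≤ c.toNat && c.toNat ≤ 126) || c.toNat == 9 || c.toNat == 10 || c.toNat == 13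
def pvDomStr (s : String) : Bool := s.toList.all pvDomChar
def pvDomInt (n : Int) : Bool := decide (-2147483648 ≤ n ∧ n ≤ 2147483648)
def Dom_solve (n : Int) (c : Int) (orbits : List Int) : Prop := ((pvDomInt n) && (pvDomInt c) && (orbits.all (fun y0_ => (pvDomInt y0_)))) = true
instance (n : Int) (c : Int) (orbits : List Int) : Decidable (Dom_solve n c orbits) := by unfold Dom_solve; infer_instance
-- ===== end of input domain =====

-- B replaces A's dict-histogram-then-sum with sort + one run-length scan adding min(run, c); equal return values, no side effects.

-- ===== PORT A =====
def solve (n : Int) (c : Int) (orbits : List Int) : Int :=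
  let orb_dict : PySem.Dict Int Int :=
    orbits.foldl (fun d x =>
      let d := if d.contains x then d else d.insert x 0
      d.insert x (d.getD x 0 + 1)) PySem.Dict.empty
  orb_dict.keys.foldl (fun tot orb =>
    let orb_val := orb_dict.getD orb 0
    if orb_val ≥ c then tot + c else tot + orb_val) 0

-- ===== PORT B =====
-- the outer while loop of Source B: each step consumes one maximal run s[i:j] of equal
-- values (the inner while's count j-i is the head plus the takeWhile-equal prefix,
-- and i = j resumes on the dropWhile suffix)
def runScan (c : Int) : List Int → Int
  | [] => 0
  | x :: s =>
      let run : Int := 1 + (s.takeWhile (fun y => y == x)).length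
      min run c + runScan c (s.dropWhile (fun y => y == x))
termination_by l => l.length
decreasing_by
  simpa using Nat.lt_succ_of_le (List.length_dropWhile_le _ _)

def solve_alt (n : Int) (c : Int) (orbits : List Int) : Int :=
  runScan c (PySem.List.sorted orbits (fun x => x) false)

-- ===== PRECONDITION & SPEC =====
def Spec_solve (n : Int) (c : Int) (orbits : List Int) (out : Int) : Prop := out = solve_alt n c orbits
instance (n : Int) (c : Int) (orbits : List Int) (out : Int) : Decidable (Spec_solve n c orbits out) := by unfold Spec_solve; infer_instance

-- ===== CLAIM (what is proved, stated in full; the proofs are below) =====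
def Claim_equal_solve : Prop := ∀ (n : Int) (c : Int) (orbits : List Int), Dom_solve n c orbits → Spec_solve n c orbits (solve n c orbits)

-- ===== LEMMAS AND PROOFS =====

-- A's counting loop (setdefault-style insert then +1) is the standard counter fold
theorem solve_fold_eq_counter (orbits : List Int) :
    orbits.foldl (fun (d : PySem.Dict Int Int) x =>
      let d := if d.contains x then d else d.insert x 0
      d.insert x (d.getD x 0 + 1)) PySem.Dict.empty = PySem.Dict.counter orbits := by
  rw [← PySem.Dict.foldl_insert_getD_add_one_eq_counter]
  apply PySem.List.foldl_congr_mem'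
  intro x _ d
  by_cases h : d.contains x
  · simp [h]
  · have hc : d.contains x = false := by simpa using h
    rw [if_neg (by simp [hc])]
    show (d.insert x 0).insert x ((d.insert x 0).getD x 0 + 1) = d.insert x (d.getD x 0 + 1)
    rw [PySem.Dict.getD_insert_self, PySem.Dict.insert_insert_self,
        PySem.Dict.getD_of_not_contains d 0 hc]

-- A's value: the capped counts summed over the distinct values (in first-occurrence order)
theorem solve_eq_sum (n c : Int) (orbits : List Int) :
    solve n c orbits =
      ((PySem.Set.ofList orbits).map
        (fun k => min ((orbits.count k : Int)) c)).sum := by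
  unfold solve
  rw [solve_fold_eq_counter orbits]
  simp only [PySem.Dict.keys_counter, PySem.Dict.getD_counter]
  have hstep : ∀ (tot k : Int),
      (if ((orbits.count k : Int)) ≥ c then tot + c else tot + (orbits.count k : Int))
        = tot + min ((orbits.count k : Int)) c := by
    intro tot k
    rcases le_or_gt c ((orbits.count k : Int)) with h | h
    · simp [h]
    · have h' : ¬ ((orbits.count k : Int)) ≥ c := not_le.mpr h
      simp [h', min_eq_left (le_of_lt h)]
  calc (PySem.Set.ofList orbits).foldl
        (fun tot orb => if ((orbits.count orb : Int)) ≥ c then tot + c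
                        else tot + (orbits.count orb : Int)) 0
      = (PySem.Set.ofList orbits).foldl
        (fun tot orb => tot + min ((orbits.count orb : Int)) c) 0 := by
        apply PySem.List.foldl_congr_mem'
        intro k _ tot; exact hstep tot k
    _ = _ := by
        rw [PySem.List.foldl_add]; simp

-- B's run scan on a ≤-sorted list produces the same capped counts, over some
-- duplicate-free enumeration of the values present
theorem runScan_eq (c : Int) (l : List Int) :
    l.Pairwise (· ≤ ·) → ∃ D : List Int, D.Nodup ∧ (∀ k, k ∈ D ↔ k ∈ l) ∧
      runScan c l = (D.map (fun k => min ((l.count k : Int)) c)).sum := by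
  induction l using runScan.induct with
  | case1 => exact fun _ => ⟨[], by simp, by simp, by simp [runScan]⟩
  | case2 x s ih =>
    intro hl
    set t := s.takeWhile (fun y => y == x) with ht
    set r := s.dropWhile (fun y => y == x) with hr
    have hsplit : s = t ++ r := (List.takeWhile_append_dropWhile).symm
    have hts : ∀ y ∈ t, y = x := by
      intro y hy
      have := List.mem_takeWhile_imp hy
      simpa using this
    have hx_le : ∀ y ∈ s, x ≤ y := by
      intro y hy; exact (List.pairwise_cons.mp hl).1 y hy
    have hrsub : ∀ y ∈ r, y ∈ s := fun y hy => (List.dropWhile_sublist _).subset hy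
    have hrpw : r.Pairwise (· ≤ ·) :=
      List.Pairwise.sublist (List.dropWhile_sublist _) ((List.pairwise_cons.mp hl).2)
    have hxr : x ∉ r := by
      intro hxr
      cases hre : r with
      | nil => simp [hre] at hxr
      | cons y r' =>
        have hy_ne : ¬ (y == x) = true := by
          have := List.head?_dropWhile_not (fun y => y == x) s
          rw [← hr, hre] at this; simpa using this
        have hy_ne' : y ≠ x := by simpa using hy_ne
        have hxy : x ≤ y := hx_le y (hrsub y (by simp [hre]))
        rw [hre] at hxr
        rcases List.mem_cons.mp hxr with h | h
        · exact hy_ne' h.symm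
        · have hyx : y ≤ x := by
            have := (List.pairwise_cons.mp (hre ▸ hrpw)).1
            exact this x h
          exact hy_ne' (le_antisymm hyx hxy)
    obtain ⟨D, hDnd, hDmem, hDsum⟩ := ih hrpw
    have hxD : x ∉ D := fun h => hxr ((hDmem x).mp h)
    refine ⟨x :: D, List.nodup_cons.mpr ⟨hxD, hDnd⟩, ?_, ?_⟩
    · intro k
      constructor
      · intro hk
        rcases List.mem_cons.mp hk with h | h
        · simp [h]
        · exact List.mem_cons_of_mem _ (hsplit ▸ List.mem_append_right t ((hDmem k).mp h))
      · intro hk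
        rcases List.mem_cons.mp hk with h | h
        · simp [h]
        · rw [hsplit] at h
          rcases List.mem_append.mp h with h | h
          · simp [hts k h]
          · exact List.mem_cons_of_mem _ ((hDmem k).mpr h)
    · rw [runScan]
      simp only [← ht, ← hr]
      rw [hDsum, List.map_cons, List.sum_cons]
      have hcx : ((x :: s).count x : Int) = 1 + (t.length : Int) := by
        rw [hsplit, List.count_cons_self, List.count_append]
        have h1 : t.count x = t.length := by
          rw [List.count_eq_length]; intro y hy; simpa using (hts y hy).symm
        have h2 : r.count x = 0 := List.count_eq_zero.mpr hxr
        rw [h1, h2]; push_cast; ring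
      rw [hcx]
      have hmap : List.map (fun k => min ((List.count k (x :: s) : Int)) c) D
          = List.map (fun k => min ((List.count k r : Int)) c) D := by
        apply List.map_congr_left
        intro k hk
        have hkr : k ∈ r := (hDmem k).mp hk
        have hkx : k ≠ x := fun h => hxr (h ▸ hkr)
        have hct : t.count k = 0 := by
          rw [List.count_eq_zero]; intro h; exact hkx (hts k h)
        rw [hsplit]
        simp [List.count_append, hct, Ne.symm hkx]
      rw [hmap]

-- ===== VERDICT (by name: the statement is the Claim_ definition above) =====
theorem solve_spec : Claim_equal_solve := by
  intro n c orbits _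
  show solve n c orbits = solve_alt n c orbits
  rw [solve_eq_sum]
  unfold solve_alt
  set s := PySem.List.sorted orbits (fun x => x) false with hs
  have hperm : s.Perm orbits := PySem.List.sorted_perm orbits (fun x => x) false
  have hpw : s.Pairwise (· ≤ ·) := by
    have := PySem.List.sorted_pairwise orbits (fun x : Int => x) 
    simpa [← hs] using this
  obtain ⟨D, hDnd, hDmem, hDsum⟩ := runScan_eq c s hpw
  rw [hDsum]
  have hmemD : ∀ k, k ∈ D ↔ k ∈ PySem.Set.ofList orbits := by
    intro k
    rw [hDmem k, ← PySem.List.dedup_eq_ofList, PySem.List.mem_dedup]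
    exact ⟨fun h => hperm.mem_iff.mp h, fun h => hperm.mem_iff.mpr h⟩
  have hpermD : (PySem.Set.ofList orbits).Perm D := by
    rw [List.perm_ext_iff_of_nodup (by
        rw [← PySem.List.dedup_eq_ofList]; exact PySem.List.nodup_dedup orbits) hDnd]
    intro a; exact (hmemD a).symm
  have hcount : ∀ k, s.count k = orbits.count k := fun k => hperm.count_eq k
  calc ((PySem.Set.ofList orbits).map (fun k => min ((orbits.count k : Int)) c)).sum
      = (D.map (fun k => min ((orbits.count k : Int)) c)).sum :=
        (hpermD.map _).sum_eq
    _ = (D.map (fun k => min ((s.count k : Int)) c)).sum := by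
        apply congrArg; apply List.map_congr_left; intro k _; rw [hcount k]
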